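-- pv_equiv track=rewrite | github.com/shrine2000/DSA | 2925-maximum-score-after-applying-operations-on-a-tree/2925-maximum-score-after-applying-operations-on-a-tree.py | maximumScoreAfterOperations
-- ===== SOURCE A (Python) =====
-- from typing import List, Set
-- from collections import defaultdict
--
-- def maximumScoreAfterOperations(edges: List[List[int]], values: List[int]) -> int:
--     def dfs(node, parent):
--         leftout, taken = 0, 0
--         for child in g[node]:
--             if child != parent:
--                 t, l = dfs(child, node)
--                 taken += t
--                 leftout += l
--         taken += max(leftout, values[node]) if leftout != 0 else 0
--         leftout = min(leftout, values[node]) if leftout != 0 else values[node]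
--         return taken, leftout
--
--     g = defaultdict(list)
--     for a,b in edges:
--         g[a].append(b)
--         g[b].append(a)
--
--     return dfs(0, -1)[0]
-- ===== SOURCE B (Python) =====
-- def maximumScoreAfterOperations(edges, values):
--     g = {}
--     for a, b in edges:
--         g.setdefault(a, []).append(b)
--         g.setdefault(b, []).append(a)
--
--     def subtree_sum(node, parent):
--         s = values[node]
--         for c in g.get(node, []):
--             if c != parent:
--                 s += subtree_sum(c, node)
--         return s
--
--     def leftout(node, parent):
--         s = 0
--         for c in g.get(node, []):
--             if c != parent:
--                 s += leftout(c, node)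
--         return values[node] if s == 0 else min(s, values[node])
--
--     return subtree_sum(0, -1) - leftout(0, -1)
-- ===== Notes on version B (the rewrite author's own statement) =====
-- stated objective: alternative
-- what changed: B never maintains A's 'taken' DP value: it computes only the single quantity leftout (minimum value that must stay healthy) in one pass and the plain subtree sum in another, returning sum - leftout as the complement, instead of A's paired (taken, leftout) DP.
-- outside the precondition, e.g. on maximumScoreAfterOperations([[1, 1], [0, 1]], [5, 7]): A returns 31, B returns 31; on maximumScoreAfterOperations([[0, 1], [0, 1]], [5, 7]): A returns 14, B returns 14
import Mathlib
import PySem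

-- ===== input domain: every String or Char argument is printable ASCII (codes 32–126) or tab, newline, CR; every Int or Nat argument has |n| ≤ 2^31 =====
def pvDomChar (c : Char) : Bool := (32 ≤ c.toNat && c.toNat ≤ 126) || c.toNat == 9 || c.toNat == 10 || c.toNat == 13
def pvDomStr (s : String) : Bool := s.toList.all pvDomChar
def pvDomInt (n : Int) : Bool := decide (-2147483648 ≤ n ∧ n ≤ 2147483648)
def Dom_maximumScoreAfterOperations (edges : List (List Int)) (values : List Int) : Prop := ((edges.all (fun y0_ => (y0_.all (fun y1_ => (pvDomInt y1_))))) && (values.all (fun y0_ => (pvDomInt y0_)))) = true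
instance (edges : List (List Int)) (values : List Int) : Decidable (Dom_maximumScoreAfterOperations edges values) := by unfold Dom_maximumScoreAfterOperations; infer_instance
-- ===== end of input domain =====

-- B replaces A's paired (taken, leftout) DP by two single-value passes (plain subtree sum and
-- the single quantity "leftout") and returns their difference; equal cost, different decomposition.

-- ===== PORT A =====
-- adjacency dict; A builds it with defaultdict(list) appends, B with setdefault appends —
-- both produce exactly this insertion-ordered dict, so the helper is shared by the two ports
def pvBuildG (edges : List (List Int)) : PySem.Dict Int (List Int) :=
  edges.foldl (fun g e =>
    match e with
    | [a, b] =>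
        let g1 := g.insert a ((g.getD a []) ++ [b])
        g1.insert b ((g1.getD b []) ++ [a])
    | _ => g) PySem.Dict.empty   -- non-2-element edges raise ValueError in Python; excluded by Pre_

-- fuel (= edges.length + 1 at the top call) only totalizes the recursion; under Pre_ the
-- traversal depth is at most edges.length so the 0-fuel branch is never reached
def pvDfsA (g : PySem.Dict Int (List Int)) (vs : List Int) : Nat → Int → Int → Int × Int
  | 0, _, _ => (0, 0)
  | fuel+1, node, parent =>
    let st := (g.getD node []).foldl
      (fun (tl : Int × Int) child =>
        if child ≠ parent then
          (tl.1 + (pvDfsA g vs fuel child node).1, tl.2 + (pvDfsA g vs fuel child node).2)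
        else tl) (0, 0)
    let v := PySem.List.pyGetD vs node 0   -- values[node]; in range under Pre_
    (st.1 + (if st.2 ≠ 0 then max st.2 v else 0),
     if st.2 ≠ 0 then min st.2 v else v)

def maximumScoreAfterOperations (edges : List (List Int)) (values : List Int) : Int :=
  (pvDfsA (pvBuildG edges) values (edges.length + 1) 0 (-1)).1

-- ===== PORT B =====
def pvSubtreeSum (g : PySem.Dict Int (List Int)) (vs : List Int) : Nat → Int → Int → Int
  | 0, _, _ => 0
  | fuel+1, node, parent =>
    (g.getD node []).foldl
      (fun s child => if child ≠ parent then s + pvSubtreeSum g vs fuel child node else s)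
      (PySem.List.pyGetD vs node 0)

def pvLeftout (g : PySem.Dict Int (List Int)) (vs : List Int) : Nat → Int → Int → Int
  | 0, _, _ => 0
  | fuel+1, node, parent =>
    let s := (g.getD node []).foldl
      (fun s child => if child ≠ parent then s + pvLeftout g vs fuel child node else s) 0
    if s = 0 then PySem.List.pyGetD vs node 0 else min s (PySem.List.pyGetD vs node 0)

def maximumScoreAfterOperations_alt (edges : List (List Int)) (values : List Int) : Int :=
  let g := pvBuildG edges
  pvSubtreeSum g values (edges.length + 1) 0 (-1) - pvLeftout g values (edges.length + 1) 0 (-1)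

-- ===== PRECONDITION & SPEC =====
def pvNbrs (edges : List (List Int)) (x : Int) : List Int :=
  edges.foldl (fun acc e =>
    match e with
    | [a, b] => if a = x then acc ++ [b] else if b = x then acc ++ [a] else acc
    | _ => acc) []

def pvReach (edges : List (List Int)) : Nat → List Int
  | 0 => [0]
  | k+1 => ((pvReach edges k) ++ (pvReach edges k).flatMap (pvNbrs edges)).dedup

-- the edges incident to the already-computed component of node 0
def pvCompEdges (edges : List (List Int)) (reach : List Int) : List (List Int) :=
  edges.filter (fun e =>
    match e with
    | [a, b] => reach.contains a || reach.contains b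
    | _ => false)

-- Pre_ = A's real domain: values nonempty, every edge is a pair, and the connected component of
-- node 0 is a simple tree (node count = incident edge count + 1) whose labels are valid Python
-- indices into values (negative labels wrap); outside it A raises ValueError/IndexError or the
-- parent-filtered DFS recurses forever, except for rare degenerate corners (a self-loop or
-- duplicate edge inside the component on which the DFS still happens to terminate).
def Pre_maximumScoreAfterOperations (edges : List (List Int)) (values : List Int) : Prop :=
  0 < values.length ∧
  (∀ e ∈ edges, e.length = 2) ∧
  (∀ x ∈ pvReach edges (2 * edges.length + 1),
      -(values.length : Int) ≤ x ∧ x < (values.length : Int)) ∧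
  (pvCompEdges edges (pvReach edges (2 * edges.length + 1))).length + 1
    = (pvReach edges (2 * edges.length + 1)).length

instance (edges : List (List Int)) (values : List Int) : Decidable (Pre_maximumScoreAfterOperations edges values) := by
  unfold Pre_maximumScoreAfterOperations; infer_instance

def pvWitness_maximumScoreAfterOperations : List (List Int) × List Int := ([[0, 1], [1, 2]], [2, 0, 3])

def Spec_maximumScoreAfterOperations (edges : List (List Int)) (values : List Int) (out : Int) : Prop := out = maximumScoreAfterOperations_alt edges values
instance (edges : List (List Int)) (values : List Int) (out : Int) : Decidable (Spec_maximumScoreAfterOperations edges values out) := by unfold Spec_maximumScoreAfterOperations; infer_instance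

-- ===== CLAIM (what is proved, stated in full; the proofs are below) =====
def Claim_equal_maximumScoreAfterOperations : Prop := ∀ (edges : List (List Int)) (values : List Int), Dom_maximumScoreAfterOperations edges values → Pre_maximumScoreAfterOperations edges values → Spec_maximumScoreAfterOperations edges values (maximumScoreAfterOperations edges values)

-- ===== LEMMAS AND PROOFS =====

-- the conditional scalar fold as a sum over the filtered children
lemma pv_foldl_scalar (f : Int → Int) (p : Int) :
    ∀ (L : List Int) (a : Int),
      L.foldl (fun s c => if c ≠ p then s + f c else s) a
        = a + ((L.filter (fun c => c != p)).map f).sum := by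
  intro L
  induction L with
  | nil => intro a; simp
  | cons c t ih =>
      intro a
      rw [List.foldl_cons]
      by_cases h : c = p
      · rw [if_neg (by simp [h]), ih]; simp [h]
      · rw [if_pos h, ih]
        simp only [List.filter_cons, bne_iff_ne, ne_eq, h, not_false_iff, if_true,
          List.map_cons, List.sum_cons]
        ring

-- the conditional pair fold, componentwise
lemma pv_foldl_pair (F : Int → Int × Int) (p : Int) :
    ∀ (L : List Int) (a b : Int),
      L.foldl (fun tl c => if c ≠ p then (tl.1 + (F c).1, tl.2 + (F c).2) else tl) (a, b)
        = (a + ((L.filter (fun c => c != p)).map (fun c => (F c).1)).sum,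
           b + ((L.filter (fun c => c != p)).map (fun c => (F c).2)).sum) := by
  intro L
  induction L with
  | nil => intro a b; simp
  | cons c t ih =>
      intro a b
      rw [List.foldl_cons]
      by_cases h : c = p
      · rw [if_neg (by simp [h]), ih]; simp [h]
      · rw [if_pos h, ih]
        simp only [List.filter_cons, bne_iff_ne, ne_eq, h, not_false_iff, if_true,
          List.map_cons, List.sum_cons, Prod.mk.injEq]
        constructor <;> ring

lemma pv_sum_map_sub (f g : Int → Int) :
    ∀ (L : List Int), (L.map (fun c => f c - g c)).sum = (L.map f).sum - (L.map g).sum := by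
  intro L
  induction L with
  | nil => simp
  | cons c t ih => simp [ih]; ring

-- the key invariant: A's pair is (subtree sum − leftout, leftout), for every fuel and graph
lemma pv_dfsA_eq (g : PySem.Dict Int (List Int)) (vs : List Int) :
    ∀ (fuel : Nat) (node parent : Int),
      pvDfsA g vs fuel node parent =
        (pvSubtreeSum g vs fuel node parent - pvLeftout g vs fuel node parent,
         pvLeftout g vs fuel node parent) := by
  intro fuel
  induction fuel with
  | zero => intro node parent; simp [pvDfsA, pvSubtreeSum, pvLeftout]
  | succ f ih =>
      intro node parent
      have h1 : (fun c => (pvDfsA g vs f c node).1)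
          = fun c => pvSubtreeSum g vs f c node - pvLeftout g vs f c node := by
        funext c; rw [ih c node]
      have h2 : (fun c => (pvDfsA g vs f c node).2)
          = fun c => pvLeftout g vs f c node := by
        funext c; rw [ih c node]
      simp only [pvDfsA, pvSubtreeSum, pvLeftout]
      rw [pv_foldl_pair (fun c => pvDfsA g vs f c node),
          pv_foldl_scalar (fun c => pvSubtreeSum g vs f c node),
          pv_foldl_scalar (fun c => pvLeftout g vs f c node)]
      rw [h1, h2, pv_sum_map_sub]
      simp only [Prod.mk.injEq, zero_add]
      generalize (List.map (fun c => pvSubtreeSum g vs f c node)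
        (List.filter (fun c => c != parent) (g.getD node []))).sum = S
      generalize (List.map (fun c => pvLeftout g vs f c node)
        (List.filter (fun c => c != parent) (g.getD node []))).sum = L
      generalize PySem.List.pyGetD vs node 0 = v
      constructor <;> split_ifs <;> omega

-- ===== VERDICT (by name: the statement is the Claim_ definition above) =====
theorem maximumScoreAfterOperations_spec : Claim_equal_maximumScoreAfterOperations := by
  intro edges values _dom _pre
  unfold Spec_maximumScoreAfterOperations maximumScoreAfterOperations maximumScoreAfterOperations_alt
  rw [pv_dfsA_eq]
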